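-- pv_equiv track=rewrite | github.com/yoronneko/qzsl6tool | python/libqzsl6tool.py | rtk_checksum
-- ===== SOURCE A (Python) =====
-- def rtk_checksum(payload):
--     checksum1 = 0
--     checksum2 = 0
--     for b in payload:
--         checksum1 += b
--         checksum2 += checksum1
--         checksum1 &= 0xff
--         checksum2 &= 0xff
--     return checksum1, checksum2
-- ===== SOURCE B (Python) =====
-- def rtk_checksum(payload):
--     # Closed form: checksum1 is the total sum mod 256; checksum2 is the sum of all
--     # prefix sums mod 256, i.e. a weighted sum where payload[i] counts (n - i) times.
--     n = len(payload)
--     checksum1 = sum(payload) & 0xff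
--     checksum2 = sum((n - i) * b for i, b in enumerate(payload)) & 0xff
--     return checksum1, checksum2
-- ===== Notes on version B (the rewrite author's own statement) =====
-- stated objective: alternative
-- what changed: Replaces A's fused two-accumulator loop with per-step masking by a closed form: checksum1 = sum(payload) & 0xff and checksum2 = weighted sum((n-i)*payload[i]) & 0xff, masking once at the end.
import Mathlib
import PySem

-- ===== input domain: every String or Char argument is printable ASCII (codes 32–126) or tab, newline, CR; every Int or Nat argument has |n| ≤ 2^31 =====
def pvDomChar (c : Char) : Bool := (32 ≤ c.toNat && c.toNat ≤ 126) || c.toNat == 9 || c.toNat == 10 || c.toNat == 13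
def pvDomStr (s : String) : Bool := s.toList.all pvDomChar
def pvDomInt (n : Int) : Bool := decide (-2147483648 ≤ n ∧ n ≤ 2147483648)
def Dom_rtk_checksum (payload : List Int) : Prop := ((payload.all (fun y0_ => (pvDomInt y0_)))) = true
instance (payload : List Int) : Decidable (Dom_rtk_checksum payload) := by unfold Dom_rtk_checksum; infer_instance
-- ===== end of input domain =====

-- B replaces A's fused two-accumulator running loop by a closed form (total sum and a
-- positionally weighted sum, each masked once at the end); objective: alternative algorithm.


-- ===== PORT A =====
-- 'x & 0xff' is ported as 'x % 256' (Int.emod): exact, since for the positive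
-- mask 0xff Python's bitwise AND equals the nonnegative remainder mod 256.
def rtk_checksum (payload : List Int) : Int × Int :=
  payload.foldl
    (fun (st : Int × Int) b =>
      let checksum1 := st.1 + b
      let checksum2 := st.2 + checksum1
      (checksum1 % 256, checksum2 % 256))
    (0, 0)

-- ===== PORT B =====
def rtk_checksum_alt (payload : List Int) : Int × Int :=
  let n : Int := payload.length
  let checksum1 := payload.sum % 256
  let checksum2 :=
    ((PySem.List.enumerate payload).map (fun p => (n - p.1) * p.2)).sum % 256
  (checksum1, checksum2)

-- ===== PRECONDITION & SPEC =====
def Spec_rtk_checksum (payload : List Int) (out : Int × Int) : Prop := out = rtk_checksum_alt payload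
instance (payload : List Int) (out : Int × Int) : Decidable (Spec_rtk_checksum payload out) := by unfold Spec_rtk_checksum; infer_instance

-- ===== CLAIM (what is proved, stated in full; the proofs are below) =====
def Claim_equal_rtk_checksum : Prop := ∀ (payload : List Int), Dom_rtk_checksum payload → Spec_rtk_checksum payload (rtk_checksum payload)

-- ===== LEMMAS AND PROOFS =====

-- the weighted sum of B, generalized over the weight base n and enumerate's start s
def pvW (n : Int) (xs : List Int) (s : Int) : Int :=
  ((PySem.List.enumerate xs s).map (fun p => (n - p.1) * p.2)).sum

theorem pvW_nil (n s : Int) : pvW n [] s = 0 := by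
  simp [pvW, PySem.List.enumerate_nil]

theorem pvW_cons (n s b : Int) (t : List Int) :
    pvW n (b :: t) s = (n - s) * b + pvW n t (s + 1) := by
  simp [pvW, PySem.List.enumerate_cons]

theorem pvW_shift (t : List Int) : ∀ (n s : Int), pvW (n + 1) t (s + 1) = pvW n t s := by
  induction t with
  | nil => intro n s; simp [pvW_nil]
  | cons b t ih =>
      intro n s
      rw [pvW_cons, pvW_cons, ih]
      ring_nf

theorem fold_closed (xs : List Int) : ∀ (c1 c2 : Int),
    xs.foldl
      (fun (st : Int × Int) b =>
        let checksum1 := st.1 + b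
        let checksum2 := st.2 + checksum1
        (checksum1 % 256, checksum2 % 256))
      (c1 % 256, c2 % 256) =
    ((c1 + xs.sum) % 256,
     (c2 + (xs.length : Int) * c1 + pvW (xs.length : Int) xs 0) % 256) := by
  induction xs with
  | nil => intro c1 c2; simp [pvW_nil]
  | cons b t ih =>
      intro c1 c2
      rw [List.foldl_cons]
      have hst :
          (let checksum1 := (c1 % 256 : Int) + b
           let checksum2 := (c2 % 256 : Int) + checksum1
           ((checksum1 % 256 : Int), (checksum2 % 256 : Int)))
            = (((c1 + b) % 256 : Int), ((c2 + c1 + b) % 256 : Int)) := by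
        simp only [Prod.mk.injEq]
        exact ⟨by omega, by omega⟩
      rw [hst, ih (c1 + b) (c2 + c1 + b)]
      have hW : pvW (↑(b :: t).length) (b :: t) 0 = (↑t.length + 1) * b + pvW (↑t.length) t 0 := by
    -- W over b::t: first weight is the full length, the tail shifts by one
        rw [show ((b :: t).length : Int) = (↑t.length + 1) by simp, pvW_cons,
           pvW_shift t (↑t.length) 0]
        ring
      refine Prod.ext ?_ ?_
      · simp; ring_nf
      · simp only [hW]
        congr 1
        simp only [List.length_cons]
        push_cast
        ring

theorem rtk_checksum_eq (payload : List Int) : rtk_checksum payload = rtk_checksum_alt payload := by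
  have h := fold_closed payload 0 0
  simp only [Int.zero_emod] at h
  unfold rtk_checksum rtk_checksum_alt
  rw [h]
  refine Prod.ext ?_ ?_
  · simp
  · simp [pvW]

-- ===== VERDICT (by name: the statement is the Claim_ definition above) =====
theorem rtk_checksum_spec : Claim_equal_rtk_checksum := by
  intro payload _
  unfold Spec_rtk_checksum
  exact rtk_checksum_eq payload
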